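-- pv_equiv track=rewrite | github.com/GioVaradashvili/Leaders-Exam-project | exam/extreme/one/one.py | non_prime_number
-- ===== SOURCE A (Python) =====
-- def non_prime_number(start,end):
--     non_prime_numbers = []
--     for num in range(start, end+1):
--         if num > 1:
--             prime = True
--             for i in range(2, num):
--                 if (num % i) == 0:
--                     prime = False
--                     break
--             if prime == False:
--                 non_prime_numbers.append(num)
--     return non_prime_numbers
-- ===== SOURCE B (Python) =====
-- def non_prime_number(start, end):
--     result = []
--     for num in range(start, end + 1):
--         if num > 1:
--             composite = False
--             i = 2
--             while i * i <= num:
--                 if num % i == 0: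
--                     composite = True
--                     break
--                 i += 1
--             if composite:
--                 result.append(num)
--     return result
-- ===== Notes on version B (the rewrite author's own statement) =====
-- stated objective: alternative
-- what changed: Trial division is cut off at sqrt(num) (while i*i <= num) instead of scanning every i in range(2, num), using the fact that a composite has a divisor no larger than its square root.
import Mathlib
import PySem

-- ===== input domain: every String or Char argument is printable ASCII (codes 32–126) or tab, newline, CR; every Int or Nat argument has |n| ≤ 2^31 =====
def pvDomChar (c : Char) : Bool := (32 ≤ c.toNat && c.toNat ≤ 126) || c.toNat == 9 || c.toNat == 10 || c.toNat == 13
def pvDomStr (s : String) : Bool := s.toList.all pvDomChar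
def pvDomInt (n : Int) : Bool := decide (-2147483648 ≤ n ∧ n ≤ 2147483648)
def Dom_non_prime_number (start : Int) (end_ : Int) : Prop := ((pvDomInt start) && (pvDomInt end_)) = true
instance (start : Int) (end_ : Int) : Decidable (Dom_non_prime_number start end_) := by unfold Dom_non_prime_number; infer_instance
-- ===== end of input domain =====

-- B replaces A's inner scan over all of range(2, num) by trial division stopped at i*i ≤ num, using that a composite has a divisor with square at most itself (objective: alternative).

-- ===== PORT A =====
-- inner loop 'for i in range(2, num): if num % i == 0: prime = False; break' — List.any is that first-hit search
def non_prime_number (start : Int) (end_ : Int) : List Int :=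
  (PySem.List.pyRange start (end_ + 1) 1).foldl
    (fun non_prime_numbers num =>
      if num > 1 then
        if (PySem.List.pyRange 2 num 1).any (fun i => PySem.Int.mod num i == 0) then
          non_prime_numbers ++ [num]
        else non_prime_numbers
      else non_prime_numbers) []

-- ===== PORT B =====
-- 'while i * i <= num: if num % i == 0: composite = True; break; i += 1'
def pvTrialLoop (num : Int) (i : Int) : Bool :=
  if _h : i * i ≤ num then
    if PySem.Int.mod num i == 0 then true
    else pvTrialLoop num (i + 1)
  else false
termination_by (num + 1 - i).toNat
decreasing_by
  have hle : i ≤ num := by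
    by_cases h0 : i ≤ 0
    · nlinarith
    · nlinarith
  omega

def non_prime_number_alt (start : Int) (end_ : Int) : List Int :=
  (PySem.List.pyRange start (end_ + 1) 1).foldl
    (fun result num =>
      if num > 1 then
        if pvTrialLoop num 2 then result ++ [num] else result
      else result) []

-- ===== PRECONDITION & SPEC =====
def Spec_non_prime_number (start : Int) (end_ : Int) (out : List Int) : Prop := out = non_prime_number_alt start end_
instance (start : Int) (end_ : Int) (out : List Int) : Decidable (Spec_non_prime_number start end_ out) := by unfold Spec_non_prime_number; infer_instance

-- ===== CLAIM (what is proved, stated in full; the proofs are below) =====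
def Claim_equal_non_prime_number : Prop := ∀ (start : Int) (end_ : Int), Dom_non_prime_number start end_ → Spec_non_prime_number start end_ (non_prime_number start end_)

-- ===== LEMMAS AND PROOFS =====

lemma pvTrialLoop_iff (num i : Int) (hi : 1 ≤ i) :
    pvTrialLoop num i = true ↔ ∃ j, i ≤ j ∧ j * j ≤ num ∧ PySem.Int.mod num j = 0 := by
  fun_induction pvTrialLoop num i with
  | case1 i hsq hmod =>
    exact ⟨fun _ => ⟨i, le_refl i, hsq, by simpa using hmod⟩, fun _ => rfl⟩
  | case2 i hsq hmod ih =>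
    rw [ih (by omega)]
    constructor
    · rintro ⟨j, hj, h1, h2⟩; exact ⟨j, by omega, h1, h2⟩
    · rintro ⟨j, hj, h1, h2⟩
      refine ⟨j, ?_, h1, h2⟩
      rcases eq_or_lt_of_le hj with rfl | h
      · exact absurd (by simpa using h2) (by simpa using hmod)
      · omega
  | case3 i hsq =>
    simp only [Bool.false_eq_true, false_iff]
    rintro ⟨j, hj, h1, _⟩
    exact hsq (by nlinarith)

lemma pvAnyA_iff (num : Int) :
    ((PySem.List.pyRange 2 num 1).any (fun i => PySem.Int.mod num i == 0) = true) ↔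
      ∃ i, 2 ≤ i ∧ i < num ∧ PySem.Int.mod num i = 0 := by
  simp [List.any_eq_true, PySem.List.mem_pyRange_one, and_assoc]

lemma pvBridge (num : Int) (h2 : 2 ≤ num) :
    (∃ i, 2 ≤ i ∧ i < num ∧ PySem.Int.mod num i = 0) ↔
      ∃ j, 2 ≤ j ∧ j * j ≤ num ∧ PySem.Int.mod num j = 0 := by
  constructor
  · rintro ⟨i, h2i, hlt, hmod⟩
    have hdvd : i ∣ num := (PySem.Int.mod_eq_zero_iff_dvd num i).mp hmod
    obtain ⟨k, hk⟩ := hdvd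
    have hkpos : 1 ≤ k := by nlinarith
    have hk2 : 2 ≤ k := by
      rcases eq_or_lt_of_le hkpos with rfl | h
      · omega
      · omega
    by_cases hsq : i * i ≤ num
    · exact ⟨i, h2i, hsq, hmod⟩
    · have hik : k < i := by nlinarith
      refine ⟨k, hk2, by nlinarith, (PySem.Int.mod_eq_zero_iff_dvd num k).mpr ⟨i, by linarith [hk]⟩⟩
  · rintro ⟨j, h2j, hsq, hmod⟩
    have hdvd : j ∣ num := (PySem.Int.mod_eq_zero_iff_dvd num j).mp hmod
    have hle : j ≤ num := Int.le_of_dvd (by omega) hdvd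
    have hlt : j < num := by
      rcases eq_or_lt_of_le hle with rfl | h
      · nlinarith
      · exact h
    exact ⟨j, h2j, hlt, hmod⟩

lemma pvStep_eq (num : Int) :
    ((PySem.List.pyRange 2 num 1).any (fun i => PySem.Int.mod num i == 0)) = pvTrialLoop num 2 := by
  by_cases h : 2 ≤ num
  · rw [Bool.eq_iff_iff, pvAnyA_iff, pvTrialLoop_iff num 2 (by omega)]
    exact pvBridge num h
  · rw [PySem.List.pyRange_one_eq_nil (by omega), pvTrialLoop,
      dif_neg (show ¬ ((2:Int) * 2 ≤ num) by omega)]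
    simp

-- ===== VERDICT (by name: the statement is the Claim_ definition above) =====
theorem non_prime_number_spec : Claim_equal_non_prime_number := by
  intro start end_ _
  unfold Spec_non_prime_number non_prime_number non_prime_number_alt
  congr 1
  funext acc num
  by_cases h : num > 1
  · simp only [if_pos h, pvStep_eq]
  · simp only [if_neg h]
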